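-- pv_equiv track=rewrite | github.com/TheFiveBoxingWizardsJumpQuickly/CipherToolBox | app/cipher/common.py | assign_digits
-- ===== SOURCE A (Python) =====
-- def assign_digits(x):
--     a=[0]*len(x)
--
--     for i in range(len(x)):
--         a[i]=[x[i],i]
--
--     a.sort(key=lambda t:(t[0],t[1]))
--
--     b=[0]*len(x)
--     for i in range(len(x)):
--         b[i]=a[i][1]
--
--     c=[0]*len(x)
--     for i in range(len(x)):
--         c[b[i]]=i+1
--
--     return c
-- ===== SOURCE B (Python) =====
-- def assign_digits(x):
--     return [1 + sum(1 for j, xj in enumerate(x) if (xj, j) < (xi, i))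
--             for i, xi in enumerate(x)]
-- ===== Notes on version B (the rewrite author's own statement) =====
-- stated objective: simpler
-- what changed: Replaces the decorate/stable-sort/invert-the-permutation pipeline (three loops plus a sort) with a one-line direct rank computation: each element's rank is 1 plus the number of (value, index) pairs lexicographically smaller than its own.
import Mathlib
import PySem

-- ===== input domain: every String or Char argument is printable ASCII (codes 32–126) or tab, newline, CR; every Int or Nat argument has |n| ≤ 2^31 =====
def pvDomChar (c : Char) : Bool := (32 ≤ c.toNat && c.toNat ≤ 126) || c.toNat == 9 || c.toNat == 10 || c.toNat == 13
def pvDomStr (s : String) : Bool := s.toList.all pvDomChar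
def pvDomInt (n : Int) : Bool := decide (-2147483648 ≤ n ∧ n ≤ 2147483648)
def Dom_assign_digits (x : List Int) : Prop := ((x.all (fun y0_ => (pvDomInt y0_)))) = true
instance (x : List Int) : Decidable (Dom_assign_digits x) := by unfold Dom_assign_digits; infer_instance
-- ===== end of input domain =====

-- B replaces A's decorate / stable-sort / invert-the-permutation pipeline by a direct
-- per-element count of lexicographically smaller (value, index) pairs (objective: simpler).

-- ===== PORT A =====
def assign_digits (x : List Int) : List Int :=
  -- a[i] = [x[i], i] : decorate each element with its index
  let a : List (Int × Nat) := x.zipIdx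
  -- a.sort(key=lambda t: (t[0], t[1]))
  let s := PySem.List.sorted2 a (fun t => t.1) (fun t => t.2) false
  -- b[i] = a[i][1]
  let b : List Nat := s.map (fun t => t.2)
  -- for i in range(len(x)): c[b[i]] = i + 1
  (List.range x.length).foldl (fun cs i => cs.set (b.getD i 0) ((i : Int) + 1))
    (List.replicate x.length (0 : Int))

-- ===== PORT B =====
def assign_digits_alt (x : List Int) : List Int :=
  x.zipIdx.map (fun p =>
    1 + (x.zipIdx.countP (fun q => decide (q.1 < p.1 ∨ (q.1 = p.1 ∧ q.2 < p.2))) : Int))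

-- ===== PRECONDITION & SPEC =====
def Spec_assign_digits (x : List Int) (out : List Int) : Prop := out = assign_digits_alt x
instance (x : List Int) (out : List Int) : Decidable (Spec_assign_digits x out) := by unfold Spec_assign_digits; infer_instance

-- ===== CLAIM (what is proved, stated in full; the proofs are below) =====
def Claim_equal_assign_digits : Prop := ∀ (x : List Int), Dom_assign_digits x → Spec_assign_digits x (assign_digits x)

-- ===== LEMMAS AND PROOFS =====

-- The lexicographic key A's tuple sort orders by.
def pvK (t : Int × Nat) : Lex (Int × Nat) := toLex t

theorem pv_sorted2_eq_sorted_lex (xs : List (Int × Nat)) :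
    PySem.List.sorted2 xs (fun t => t.1) (fun t => t.2) false
      = PySem.List.sorted xs pvK false := by
  unfold PySem.List.sorted2 PySem.List.sorted
  have hb : (fun (a b : Int × Nat) =>
        decide (a.1 < b.1) || (!decide (b.1 < a.1) && decide (a.2 < b.2)))
      = fun a b => decide (pvK a < pvK b) := by
    funext a b
    rcases lt_trichotomy a.1 b.1 with h | h | h
    · simp [pvK, Prod.Lex.toLex_lt_toLex, h]
    · simp [pvK, Prod.Lex.toLex_lt_toLex, h]
    · simp [pvK, Prod.Lex.toLex_lt_toLex, h, not_lt_of_gt h, ne_of_gt h]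
  simp only [if_neg (by decide : ¬ (false = true))] at *
  rw [hb]

theorem pvK_inj : Function.Injective pvK := by
  intro a b h
  exact toLex.injective h

-- In a strictly key-sorted list, the number of elements with key below M[i] is i.
theorem pv_countP_pairwise (M : List (Int × Nat))
    (h : M.Pairwise (fun a b => pvK a < pvK b)) (i : Nat) (hi : i < M.length)
    (p : Int × Nat) (hp : M[i] = p) :
    M.countP (fun q => decide (pvK q < pvK p)) = i := by
  have hpw := List.pairwise_iff_getElem.mp h
  rw [List.countP_eq_length_filter]
  conv_lhs => rw [← List.take_append_drop i M]
  rw [List.filter_append, List.length_append]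
  have h1 : (M.take i).filter (fun q => decide (pvK q < pvK p)) = M.take i := by
    rw [List.filter_eq_self]
    intro a ha
    obtain ⟨j, hj, hja⟩ := List.mem_iff_getElem.mp ha
    have hj' : j < i := by
      have := hj; simp [List.length_take] at this; omega
    rw [List.getElem_take] at hja
    subst hja
    exact decide_eq_true (hp ▸ hpw j i (by omega) hi hj')
  have h2 : (M.drop i).filter (fun q => decide (pvK q < pvK p)) = [] := by
    rw [List.filter_eq_nil_iff]
    intro a ha
    obtain ⟨j, hj, hja⟩ := List.mem_iff_getElem.mp ha
    rw [List.getElem_drop] at hja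
    subst hja
    cases j with
    | zero =>
        have : M[i + 0]'(by omega) = p := by
          simp only [Nat.add_zero]; exact hp
        rw [this]
        simp
    | succ m =>
        have hlt : pvK p < pvK (M[i + (m + 1)]'(by simp at hj ⊢; omega)) :=
          hp ▸ hpw i (i + (m + 1)) hi (by simp at hj ⊢; omega) (by omega)
        simp only [decide_eq_true_eq]
        exact not_lt_of_gt hlt
  rw [h1, h2]
  simp [List.length_take]
  omega

-- The assignment loop preserves the length of c.
theorem pv_foldl_set_length (b : List Nat) (ms : List Nat) (cs : List Int) :
    (ms.foldl (fun cs i => cs.set (b.getD i 0) ((i : Int) + 1)) cs).length = cs.length := by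
  induction ms generalizing cs with
  | nil => rfl
  | cons i t ih => simp only [List.foldl_cons]; rw [ih, List.length_set]

-- What the assignment loop 'for i in ms: c[b[i]] = i+1' leaves at position k.
theorem pv_foldl_set_getElem (b : List Nat) (hnd : b.Nodup) :
    ∀ (ms : List Nat) (cs : List Int) (k : Nat) (hk : k < cs.length),
    (∀ i ∈ ms, i < b.length) →
    (ms.foldl (fun cs i => cs.set (b.getD i 0) ((i : Int) + 1)) cs)[k]'(by
        rw [pv_foldl_set_length]; exact hk)
      = if k ∈ b ∧ List.idxOf k b ∈ ms then ((List.idxOf k b : Int) + 1) else cs[k]'hk := by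
  intro ms
  induction ms with
  | nil => intro cs k hk _; simp
  | cons i t ih =>
      intro cs k hk hmem
      have hib : i < b.length := hmem i (List.mem_cons_self)
      have hgd : b.getD i 0 = b[i] := List.getD_eq_getElem b 0 hib
      have hk' : k < (cs.set (b.getD i 0) ((i : Int) + 1)).length := by
        rw [List.length_set]; exact hk
      have := ih (cs.set (b.getD i 0) ((i : Int) + 1)) k hk'
        (fun j hj => hmem j (List.mem_cons_of_mem _ hj))
      simp only [List.foldl_cons]
      rw [this]
      by_cases h1 : k ∈ b ∧ List.idxOf k b ∈ t
      · rw [if_pos h1, if_pos ⟨h1.1, List.mem_cons_of_mem _ h1.2⟩]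
      · rw [if_neg h1]
        by_cases hbi : b[i] = k
        · have hkb : k ∈ b := hbi ▸ List.getElem_mem hib
          have hidx : List.idxOf k b = i := by
            have hlt := List.idxOf_lt_length_of_mem hkb
            have : b[List.idxOf k b]'hlt = b[i]'hib := by
              rw [List.getElem_idxOf, hbi]
            exact (hnd.getElem_inj_iff.mp this)
          rw [if_pos ⟨hkb, by rw [hidx]; exact List.mem_cons_self⟩, hidx]
          simp only [hgd, hbi]
          simp [List.getElem_set_self]
        · have hset : (cs.set (b.getD i 0) ((i : Int) + 1))[k]'hk' = cs[k]'hk := by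
            apply List.getElem_set_ne
            rw [hgd]; exact hbi
          rw [hset]
          have hC : ¬ (k ∈ b ∧ List.idxOf k b ∈ i :: t) := by
            rintro ⟨hkb, hmem'⟩
            rcases List.mem_cons.mp hmem' with hidx | hidx
            · subst hidx
              exact hbi (List.getElem_idxOf hib)
            · exact h1 ⟨hkb, hidx⟩
          rw [if_neg hC]

-- zipIdx facts
theorem pv_zipIdx_pairwise (x : List Int) :
    x.zipIdx.Pairwise (fun a b => a.2 < b.2) := by
  rw [List.pairwise_iff_getElem]
  intro i j hi hj hij
  rw [List.getElem_zipIdx, List.getElem_zipIdx]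
  simpa using hij

theorem pv_zipIdx_nodup (x : List Int) : x.zipIdx.Nodup :=
  (pv_zipIdx_pairwise x).imp (fun h he => absurd (he ▸ h) (lt_irrefl _))

-- ===== VERDICT (by name: the statement is the Claim_ definition above) =====
theorem assign_digits_spec : Claim_equal_assign_digits := by
  intro x _
  unfold Spec_assign_digits assign_digits assign_digits_alt
  simp only []
  set n := x.length with hn
  set L : List (Int × Nat) := x.zipIdx with hL
  set S := PySem.List.sorted2 L (fun t => t.1) (fun t => t.2) false with hS
  have hSdef : S = PySem.List.sorted L pvK false := pv_sorted2_eq_sorted_lex L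
  have hperm : S.Perm L := hSdef ▸ PySem.List.sorted_perm L pvK false
  have hLlen : L.length = n := List.length_zipIdx
  have hSlen : S.length = n := by rw [hperm.length_eq, hLlen]
  have hLnodup : L.Nodup := pv_zipIdx_nodup x
  have hSnodup : S.Nodup := hperm.nodup_iff.mpr hLnodup
  have hSle : S.Pairwise (fun a b => pvK a ≤ pvK b) := by
    rw [hSdef]; exact PySem.List.sorted_pairwise L pvK
  have hSlt : S.Pairwise (fun a b => pvK a < pvK b) :=
    (hSle.and hSnodup).imp (fun ⟨hle, hne⟩ =>
      lt_of_le_of_ne hle (fun hk => hne (pvK_inj hk)))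
  set b : List Nat := S.map (fun t => t.2) with hb
  have hblen : b.length = n := by rw [hb, List.length_map, hSlen]
  have hbperm : b.Perm (L.map (fun t => t.2)) := hperm.map _
  have hbnodup : b.Nodup := by
    apply hbperm.nodup_iff.mpr
    have hLsnd : (L.map (fun t => t.2)).Pairwise (· < ·) := by
      rw [List.pairwise_map]; exact pv_zipIdx_pairwise x
    exact hLsnd.imp ne_of_lt
  apply List.ext_getElem
  · rw [pv_foldl_set_length, List.length_replicate, List.length_map, hLlen]
  · intro k hk1 hk2
    have hkn : k < n := by
      rw [pv_foldl_set_length, List.length_replicate] at hk1; exact hk1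
    -- B side value
    have hLk : L[k]'(by omega) = (x[k]'hkn, k) := by
      simp [hL, List.getElem_zipIdx]
    -- A side: the loop result
    have hrange : ∀ i ∈ List.range n, i < b.length := by
      intro i hi; rw [hblen]; exact List.mem_range.mp hi
    have hloop := pv_foldl_set_getElem b hbnodup (List.range n)
      (List.replicate n (0 : Int)) k (by rw [List.length_replicate]; exact hkn) hrange
    have hkb : k ∈ b := by
      have : k ∈ L.map (fun t => t.2) := by
        apply List.mem_map.mpr
        exact ⟨L[k]'(by omega), List.getElem_mem _, by rw [hLk]⟩
      exact (hperm.map (fun t => t.2)).mem_iff.mpr this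
    have hidxlt : List.idxOf k b < n := by
      rw [← hblen]; exact List.idxOf_lt_length_of_mem hkb
    have hcond : k ∈ b ∧ List.idxOf k b ∈ List.range n :=
      ⟨hkb, List.mem_range.mpr hidxlt⟩
    set i := List.idxOf k b with hi
    -- S[i] = (x[k], k)
    have hbi : b[i]'(by omega) = k := List.getElem_idxOf (by omega)
    have hSi2 : (S[i]'(by omega)).2 = k := by
      have : b[i]'(by omega) = (S[i]'(by omega)).2 := by
        simp [hb]
      rw [← this, hbi]
    have hSiL : S[i]'(by omega) ∈ L := hperm.mem_iff.mp (List.getElem_mem _)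
    have hSi : S[i]'(by omega) = (x[k]'hkn, k) := by
      have h1 : (((S[i]'(by omega)).1, (S[i]'(by omega)).2)) ∈ x.zipIdx := by
        simpa using hSiL
      obtain ⟨-, hjlt, hvx⟩ := List.mem_zipIdx h1
      apply Prod.ext
      · rw [hvx]; simp [hSi2]
      · exact hSi2
    -- count
    have hcount : L.countP (fun q => decide (pvK q < pvK ((x[k]'hkn, k) : Int × Nat))) = i := by
      rw [← hperm.countP_eq]
      exact pv_countP_pairwise S hSlt i (by omega) _ hSi
    -- now compute both sides
    rw [hloop, if_pos hcond]
    rw [List.getElem_map, hLk]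
    have hpredeq : L.countP (fun q => decide (q.1 < x[k]'hkn ∨ (q.1 = x[k]'hkn ∧ q.2 < k)))
        = L.countP (fun q => decide (pvK q < pvK ((x[k]'hkn, k) : Int × Nat))) := by
      apply List.countP_congr
      intro q _
      simp [pvK, Prod.Lex.toLex_lt_toLex]
    rw [hpredeq, hcount]
    omega
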